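-- pv_equiv track=rewrite | github.com/YaxitaAmin/CassandraSecurity | cve_collector.py | find_matching_package
-- ===== SOURCE A (Python) =====
-- from typing import List, Dict, Optional, Tuple
--
-- def find_matching_package(cve: Dict, packages: List[Tuple[int, str, str]]) -> Optional[Tuple[int, str, str]]:
--     """Try to find matching package based on CVE description"""
--     description = cve.get('description', '').lower()
--
--     # Look for package names in description
--     for pkg_id, pkg_name, ecosystem in packages:
--         pkg_name_lower = pkg_name.lower()
--
--         # Direct name match
--         if pkg_name_lower in description:
--             return (pkg_id, pkg_name, ecosystem)
--
--         # Check for common patterns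
--         if any(keyword in description for keyword in [pkg_name_lower, f"{pkg_name_lower} package", f"{pkg_name_lower} library"]):
--             return (pkg_id, pkg_name, ecosystem)
--
--     return None
-- ===== SOURCE B (Python) =====
-- from typing import List, Dict, Optional, Tuple
--
-- def find_matching_package(cve: Dict, packages: List[Tuple[int, str, str]]) -> Optional[Tuple[int, str, str]]:
--     """Index the packages by lowered name (keeping the first occurrence of each),
--     test each distinct name against the description once, and return the
--     earliest-listed package among the matching names."""
--     description = cve.get('description', '').lower()
--     first_by_name = {}
--     for index, package in enumerate(packages):
--         first_by_name.setdefault(package[1].lower(), (index, package))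
--     candidates = [entry for name, entry in first_by_name.items() if name in description]
--     if not candidates:
--         return None
--     return min(candidates, key=lambda entry: entry[0])[1]
-- ===== Notes on version B (the rewrite author's own statement) =====
-- stated objective: alternative
-- what changed: A scans package-by-package testing substring containment with a redundant keyword-pattern branch; B builds a first-occurrence index of packages keyed by lowered name, tests each distinct name against the description once, and returns the earliest-listed matching entry.
import Mathlib
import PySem

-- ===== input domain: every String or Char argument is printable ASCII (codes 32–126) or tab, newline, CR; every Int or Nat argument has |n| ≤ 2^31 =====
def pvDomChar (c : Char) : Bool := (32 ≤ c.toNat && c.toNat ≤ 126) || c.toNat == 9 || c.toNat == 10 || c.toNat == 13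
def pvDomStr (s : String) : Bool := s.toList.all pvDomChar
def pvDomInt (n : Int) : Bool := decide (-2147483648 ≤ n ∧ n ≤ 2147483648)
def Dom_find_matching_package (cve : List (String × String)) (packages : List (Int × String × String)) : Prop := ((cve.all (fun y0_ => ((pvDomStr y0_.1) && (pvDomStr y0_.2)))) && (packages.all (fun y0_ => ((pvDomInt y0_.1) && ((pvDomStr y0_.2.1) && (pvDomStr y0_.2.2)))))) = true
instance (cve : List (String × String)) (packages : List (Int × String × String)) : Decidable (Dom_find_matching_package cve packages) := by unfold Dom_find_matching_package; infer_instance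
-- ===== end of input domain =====

-- B indexes the packages by lowered name once (first occurrence wins), tests each
-- distinct name against the description once, and returns the earliest-listed match;
-- same return value as A's per-package scan, a different (index-then-select) algorithm.

-- ===== PORT A =====
-- cve.get('description', '').lower(), taken to chars (PySem.Chars.lower is exact)
def pvDesc (cve : List (String × String)) : List Char :=
  PySem.Chars.lower (PySem.Dict.getD (PySem.Dict.mk cve) "description" "").toList

-- A's 'for pkg_id, pkg_name, ecosystem in packages: …' loop, branch for branch
def pvGoA (d : List Char) : List (Int × String × String) → Option (Int × String × String)
  | [] => none
  | (pid, name, eco) :: rest =>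
    let nl := PySem.Chars.lower name.toList
    if PySem.Chars.isIn nl d then some (pid, name, eco)
    else if [nl, nl ++ " package".toList, nl ++ " library".toList].any
              (fun k => PySem.Chars.isIn k d) then some (pid, name, eco)
    else pvGoA d rest

def find_matching_package (cve : List (String × String)) (packages : List (Int × String × String)) : Option (Int × String × String) :=
  pvGoA (pvDesc cve) packages

-- ===== PORT B =====
-- 'for index, package in enumerate(packages): first_by_name.setdefault(package[1].lower(), (index, package))'
def pvIndexByName (packages : List (Int × String × String)) :
    PySem.Dict String (Int × (Int × String × String)) :=
  (PySem.List.enumerate packages).foldl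
    (fun d ip => d.setdefault (PySem.Str.lower ip.2.2.1) ip) PySem.Dict.empty

def find_matching_package_alt (cve : List (String × String)) (packages : List (Int × String × String)) : Option (Int × String × String) :=
  let d := pvDesc cve
  let candidates :=
    ((pvIndexByName packages).items.filter
      (fun kv => PySem.Chars.isIn kv.1.toList d)).map (·.2)
  match PySem.List.min? candidates (fun e => e.1) with
  | some e => some e.2
  | none => none

-- ===== PRECONDITION & SPEC =====
def Spec_find_matching_package (cve : List (String × String)) (packages : List (Int × String × String)) (out : Option (Int × String × String)) : Prop := out = find_matching_package_alt cve packages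
instance (cve : List (String × String)) (packages : List (Int × String × String)) (out : Option (Int × String × String)) : Decidable (Spec_find_matching_package cve packages out) := by unfold Spec_find_matching_package; infer_instance

-- ===== CLAIM (what is proved, stated in full; the proofs are below) =====
def Claim_equal_find_matching_package : Prop := ∀ (cve : List (String × String)) (packages : List (Int × String × String)), Dom_find_matching_package cve packages → Spec_find_matching_package cve packages (find_matching_package cve packages)

-- ===== LEMMAS AND PROOFS =====

-- the one condition both programs decide per package
def pvPred (d : List Char) (p : Int × String × String) : Bool :=
  PySem.Chars.isIn (PySem.Chars.lower p.2.1.toList) d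

-- A's second branch is subsumed by the first: its keyword list starts with the name itself,
-- and 'name + suffix' being a substring forces 'name' to be one
theorem pvGoA_eq_find? (d : List Char) (l : List (Int × String × String)) :
    pvGoA d l = l.find? (pvPred d) := by
  induction l with
  | nil => rfl
  | cons x rest ih =>
    obtain ⟨pid, name, eco⟩ := x
    by_cases h : PySem.Chars.isIn (PySem.Chars.lower name.toList) d = true
    · simp [pvGoA, List.find?, pvPred, h]
    · have hsub : ∀ suf : List Char,
          PySem.Chars.isIn (PySem.Chars.lower name.toList ++ suf) d = false := by
        intro suf
        rcases hc : PySem.Chars.isIn (PySem.Chars.lower name.toList ++ suf) d with _ | _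
        · rfl
        · exfalso
          have hinf := (PySem.Chars.isIn_iff_infix _ _).mp hc
          have : PySem.Chars.lower name.toList <:+: d :=
            (List.prefix_append _ suf).isInfix.trans hinf
          exact h ((PySem.Chars.isIn_iff_infix _ _).mpr this)
      have h0 : PySem.Chars.isIn (PySem.Chars.lower name.toList ++ []) d = false := hsub []
      simp only [List.append_nil] at h0
      simp [pvGoA, List.find?, pvPred, h0, hsub, ih]

-- key of an enumerated package
def pvKey (z : Int × (Int × String × String)) : String := PySem.Str.lower z.2.2.1

-- the setdefault loop, characterised by lookup: existing entries persist,
-- a missing key gets the FIRST element of the list carrying it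
theorem get?_indexFold (l : List (Int × (Int × String × String)))
    (d : PySem.Dict String (Int × (Int × String × String))) (k : String) :
    (l.foldl (fun d ip => d.setdefault (pvKey ip) ip) d).get? k =
      ((d.get? k).or (l.find? (fun z => pvKey z == k))) := by
  induction l generalizing d with
  | nil => simp
  | cons z t ih =>
    simp only [List.foldl_cons, ih, List.find?]
    by_cases hk : k = pvKey z
    · subst hk
      rw [PySem.Dict.get?_setdefault_self]
      rcases hgz : d.get? (pvKey z) with _ | v
      · simp
      · simp
    · rw [PySem.Dict.get?_setdefault_of_ne _ _ hk]
      have : (pvKey z == k) = false := by simpa [beq_iff_eq] using (fun h => hk h.symm)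
      simp [this]

-- keys of the built index stay nodup (it is a setdefault = conditional-insert loop)
theorem nodup_keys_indexFold (l : List (Int × (Int × String × String)))
    (d : PySem.Dict String (Int × (Int × String × String))) (h : d.keys.Nodup) :
    (l.foldl (fun d ip => d.setdefault (pvKey ip) ip) d).keys.Nodup := by
  induction l generalizing d with
  | nil => exact h
  | cons z t ih =>
    rw [List.foldl_cons]
    refine ih _ ?_
    rcases hc : d.contains (pvKey z) with _ | _
    · rw [PySem.Dict.setdefault_of_not_contains _ _ hc]
      exact PySem.Dict.nodup_keys_insert _ _ _ h
    · rw [PySem.Dict.setdefault_of_contains _ _ hc]; exact h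

theorem le_fst_of_mem_enumerate {α : Type} (l : List α) (s : Int)
    (z : Int × α) (h : z ∈ PySem.List.enumerate l s) : s ≤ z.1 := by
  obtain ⟨k, _, rfl⟩ := (PySem.List.mem_enumerate_iff l s z).mp h
  simp

-- the minimum-index hit is exactly the first package in list order that matches
theorem find?_eq_of_min (d : List Char) :
    ∀ (l : List (Int × String × String)) (s : Int) (b : Int × (Int × String × String)),
    b ∈ PySem.List.enumerate l s → pvPred d b.2 = true →
    (∀ z ∈ PySem.List.enumerate l s, pvPred d z.2 = true → b.1 ≤ z.1) →
    l.find? (pvPred d) = some b.2 := by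
  intro l
  induction l with
  | nil => intro s b hb; simp [PySem.List.enumerate] at hb
  | cons x t ih =>
    intro s b hb hp hmin
    rw [PySem.List.enumerate_cons] at hb hmin
    by_cases hx : pvPred d x = true
    · have hb1 : b.1 ≤ s := hmin (s, x) (by simp) hx
      rcases List.mem_cons.mp hb with rfl | hbt
      · simp [List.find?, hx]
      · exfalso
        have := le_fst_of_mem_enumerate t (s + 1) b hbt
        omega
    · rcases List.mem_cons.mp hb with rfl | hbt
      · simp at hp; exact absurd hp hx
      · have : t.find? (pvPred d) = some b.2 :=
          ih (s + 1) b hbt hp (fun z hz hpz => hmin z (List.mem_cons_of_mem _ hz) hpz)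
        simp [List.find?, hx, this]

-- a find? over enumerate by key returns an element no later (in index) than any
-- other element of the same key
theorem find?_key_le (l : List (Int × String × String)) (k : String)
    (z : Int × (Int × String × String)) (hz : z ∈ PySem.List.enumerate l 0)
    (hk : pvKey z = k) :
    ∃ w, (PySem.List.enumerate l 0).find? (fun y => pvKey y == k) = some w ∧
      w ∈ PySem.List.enumerate l 0 ∧ pvKey w = k ∧ w.1 ≤ z.1 := by
  rcases hf : (PySem.List.enumerate l 0).find? (fun y => pvKey y == k) with _ | w
  · exfalso
    have := List.find?_eq_none.mp hf z hz
    simp [hk] at this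
  · obtain ⟨l1, l2, hsplit, hnot⟩ := List.find?_eq_some_iff_append.mp hf |>.2
    have hwmem := List.mem_of_find?_eq_some hf
    have hwk : pvKey w = k := by
      have := List.find?_some hf; simpa [beq_iff_eq] using this
    refine ⟨w, rfl, hwmem, hwk, ?_⟩
    rw [hsplit] at hz
    rcases List.mem_append.mp hz with h1 | h2
    · exfalso; have := hnot z h1; simp [hk] at this
    · rcases List.mem_cons.mp h2 with rfl | h2
      · exact le_refl _
      · have hpair := PySem.List.pairwise_lt_enumerate l 0
        rw [hsplit] at hpair
        have := (List.pairwise_append.mp (hpair)).2.1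
        have hlt : w.1 < z.1 := by
          have := List.pairwise_cons.mp this |>.1 z h2
          exact this
        omega

-- lookup in the built index = first enumerated package with that lowered name
theorem get?_pvIndexByName (packages : List (Int × String × String)) (k : String) :
    (pvIndexByName packages).get? k =
      (PySem.List.enumerate packages).find? (fun z => pvKey z == k) := by
  unfold pvIndexByName
  rw [show (fun (d : PySem.Dict String (Int × (Int × String × String))) ip =>
        d.setdefault (PySem.Str.lower ip.2.2.1) ip) =
      (fun d ip => d.setdefault (pvKey ip) ip) from rfl]
  rw [get?_indexFold]
  simp

theorem nodup_keys_pvIndexByName (packages : List (Int × String × String)) :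
    (pvIndexByName packages).keys.Nodup := by
  unfold pvIndexByName
  exact nodup_keys_indexFold _ _ (by simp [PySem.Dict.keys, PySem.Dict.empty])

-- pvPred through the key: matching the lowered name = matching the key's chars
theorem pvPred_eq_key (d : List Char) (z : Int × (Int × String × String)) :
    pvPred d z.2 = PySem.Chars.isIn (pvKey z).toList d := by
  simp [pvPred, pvKey]

-- ===== VERDICT (by name: the statement is the Claim_ definition above) =====
theorem find_matching_package_spec : Claim_equal_find_matching_package := by
  intro cve packages _
  show find_matching_package cve packages = find_matching_package_alt cve packages
  unfold find_matching_package find_matching_package_alt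
  rw [pvGoA_eq_find?]
  set d := pvDesc cve with hd
  set items := (pvIndexByName packages).items with hitems
  rcases hmin : PySem.List.min?
      ((items.filter (fun kv => PySem.Chars.isIn kv.1.toList d)).map (·.2))
      (fun e => e.1) with _ | b
  · -- no candidate: no package matches
    have hnil := (PySem.List.min?_eq_none_iff _ _).mp hmin
    have hfe : items.filter (fun kv => PySem.Chars.isIn kv.1.toList d) = [] :=
      List.map_eq_nil_iff.mp hnil
    simp only [hmin]
    rw [List.find?_eq_none]
    intro p hp hpred
    obtain ⟨j, hj, rfl⟩ := List.mem_iff_getElem.mp hp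
    set z : Int × (Int × String × String) := ((j : Int), packages[j]) with hz
    have hzmem : z ∈ PySem.List.enumerate packages 0 := by
      rw [PySem.List.mem_enumerate_iff]
      exact ⟨j, hj, by simp [hz]⟩
    obtain ⟨w, hf, hwmem, hwk, _⟩ := find?_key_le packages (pvKey z) z hzmem rfl
    have hget : (pvIndexByName packages).get? (pvKey z) = some w := by
      rw [get?_pvIndexByName]; exact hf
    have hmemitems : (pvKey z, w) ∈ items :=
      PySem.Dict.mem_items_of_get?_eq_some _ hget
    have : (pvKey z, w) ∈ items.filter (fun kv => PySem.Chars.isIn kv.1.toList d) := by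
      rw [List.mem_filter]
      refine ⟨hmemitems, ?_⟩
      have := pvPred_eq_key d z
      simp only [hz] at this ⊢
      rw [← this]; exact hpred
    rw [hfe] at this; simp at this
  · -- some candidate: the minimum-index one is A's first match
    have hbmem := PySem.List.min?_mem hmin
    have hbmin := PySem.List.min?_isMin hmin
    obtain ⟨kv, hkvmem, rfl⟩ := List.mem_map.mp hbmem
    obtain ⟨hkvitems, hkvpred⟩ := List.mem_filter.mp hkvmem
    have hget : (pvIndexByName packages).get? kv.1 = some kv.2 := by
      have : (kv.1, kv.2) ∈ (pvIndexByName packages).items := hkvitems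
      exact PySem.Dict.get?_of_mem_items _ this (nodup_keys_pvIndexByName packages)
    rw [get?_pvIndexByName] at hget
    have hbenum : kv.2 ∈ PySem.List.enumerate packages 0 := List.mem_of_find?_eq_some hget
    have hbkey : pvKey kv.2 = kv.1 := by
      have := List.find?_some hget; simpa [beq_iff_eq] using this
    have hbpred : pvPred d kv.2.2 = true := by
      rw [pvPred_eq_key, hbkey]; exact hkvpred
    have hres : packages.find? (pvPred d) = some kv.2.2 := by
      refine find?_eq_of_min d packages 0 kv.2 hbenum hbpred ?_
      intro z hz hpz
      obtain ⟨w, hf, hwmem, hwk, hwle⟩ := find?_key_le packages (pvKey z) z hz rfl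
      have hgetw : (pvIndexByName packages).get? (pvKey z) = some w := by
        rw [get?_pvIndexByName]; exact hf
      have hwitems : (pvKey z, w) ∈ items :=
        PySem.Dict.mem_items_of_get?_eq_some _ hgetw
      have hwfilter : (pvKey z, w) ∈ items.filter (fun kv => PySem.Chars.isIn kv.1.toList d) := by
        rw [List.mem_filter]
        refine ⟨hwitems, ?_⟩
        rw [← pvPred_eq_key]; exact hpz
      have hwcand : w ∈ (items.filter (fun kv => PySem.Chars.isIn kv.1.toList d)).map (·.2) :=
        List.mem_map.mpr ⟨(pvKey z, w), hwfilter, rfl⟩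
      have := hbmin w hwcand
      omega
    simp only [hmin, hres]
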